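-- pv_equiv track=rewrite | github.com/dudamarlena/pyc_source | pycfiles/sillymap-0.1.0-py2.7/count_lookup.py | count_lookup
-- ===== SOURCE A (Python) =====
-- from collections import Counter
--
-- def count_lookup(text):
--     """Returns a lookup table for c, returning the
--     number of characthers in text lexically smaller than c.
--     """
--     char_count = Counter(text)
--     lookup = {}
--     current_count = 0
--     for c in sorted(list(set(text))):
--         lookup[c] = current_count
--         current_count += char_count[c]
--
--     return lookup
-- ===== SOURCE B (Python) =====
-- def count_lookup(text):
--     """Returns a lookup table for c, returning the
--     number of characthers in text lexically smaller than c.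
--     """
--     return {c: sum(1 for x in text if x < c) for c in sorted(set(text))}
-- ===== Notes on version B (the rewrite author's own statement) =====
-- stated objective: simpler
-- what changed: Replaces A's Counter + running-accumulator over sorted distinct chars by a one-line dict comprehension that, for each distinct char, directly counts the characters of the text smaller than it; no counts table and no running state are maintained.
import Mathlib
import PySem

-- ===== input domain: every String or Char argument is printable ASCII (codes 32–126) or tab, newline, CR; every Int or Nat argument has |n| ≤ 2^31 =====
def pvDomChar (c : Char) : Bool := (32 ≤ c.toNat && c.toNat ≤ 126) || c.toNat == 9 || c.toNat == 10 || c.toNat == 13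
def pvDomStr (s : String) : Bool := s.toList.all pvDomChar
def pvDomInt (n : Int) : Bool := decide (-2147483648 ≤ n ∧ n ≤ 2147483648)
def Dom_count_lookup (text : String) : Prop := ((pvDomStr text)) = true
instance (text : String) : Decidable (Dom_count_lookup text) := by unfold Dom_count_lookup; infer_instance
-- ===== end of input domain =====

-- B replaces A's Counter + running-accumulator pass by directly counting, for each distinct
-- character, the characters of the text smaller than it (simpler: no counts, no running state).

-- ===== PORT A =====
def count_lookup (text : String) : List (String × Int) :=
  let char_count := PySem.Dict.counter text.toList
  let fin := (PySem.List.sorted (PySem.Set.ofList text.toList) (fun c => c) false).foldl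
    (fun (st : PySem.Dict Char Int × Int) c =>
      (st.1.insert c st.2, st.2 + char_count.getD c 0))
    (PySem.Dict.empty, 0)
  fin.1.items.map (fun p => (String.ofList [p.1], p.2))

-- ===== PORT B =====
def count_lookup_alt (text : String) : List (String × Int) :=
  -- {c: sum(1 for x in text if x < c) for c in sorted(set(text))}
  ((PySem.List.sorted (PySem.Set.ofList text.toList) (fun c => c) false).foldl
    (fun (d : PySem.Dict Char Int) c =>
      d.insert c (((text.toList.filter (fun x => decide (x < c))).map (fun _ => (1 : Int))).sum))
    PySem.Dict.empty).items.map (fun p => (String.ofList [p.1], p.2))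

-- ===== PRECONDITION & SPEC =====
def Spec_count_lookup (text : String) (out : List (String × Int)) : Prop := out = count_lookup_alt text
instance (text : String) (out : List (String × Int)) : Decidable (Spec_count_lookup text out) := by unfold Spec_count_lookup; infer_instance

-- ===== CLAIM (what is proved, stated in full; the proofs are below) =====
def Claim_equal_count_lookup : Prop := ∀ (text : String), Dom_count_lookup text → Spec_count_lookup text (count_lookup text)

-- ===== LEMMAS AND PROOFS =====

-- A's loop: lookup in the final dict (value assigned to k = acc + counts of the keys before k).
theorem aFold_get? (cnt : Char → Int) :
    ∀ (l : List Char), l.Nodup → ∀ (d : PySem.Dict Char Int) (acc : Int) (k : Char),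
    ((l.foldl (fun (st : PySem.Dict Char Int × Int) c => (st.1.insert c st.2, st.2 + cnt c)) (d, acc)).1).get? k
      = if k ∈ l then some (acc + ((l.takeWhile (fun c => !(c == k))).map cnt).sum) else d.get? k := by
  intro l
  induction l with
  | nil => intro _ d acc k; simp
  | cons c t ih =>
    intro hnd d acc k
    simp only [List.foldl_cons]
    rw [ih (List.nodup_cons.mp hnd).2 (d.insert c acc) (acc + cnt c) k]
    by_cases hk : k = c
    · subst hk
      have hkt : k ∉ t := (List.nodup_cons.mp hnd).1
      simp [hkt, PySem.Dict.get?_insert_self]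
    · by_cases hkt : k ∈ t
      · have hc : (!(c == k)) = true := by simp [Ne.symm hk]
        simp only [List.mem_cons, hkt, or_true, if_pos, List.takeWhile_cons, hc,
          List.map_cons, List.sum_cons]
        rw [add_assoc]
      · have : k ∉ (c :: t) := by simp [hk, hkt]
        simp [hkt, this, PySem.Dict.get?_insert_of_ne _ _ hk]

-- A's loop: keys of the final dict (fresh distinct keys append in order).
theorem aFold_keys (cnt : Char → Int) :
    ∀ (l : List Char), l.Nodup → ∀ (d : PySem.Dict Char Int) (acc : Int),
    (∀ c ∈ l, d.contains c = false) →
    ((l.foldl (fun (st : PySem.Dict Char Int × Int) c => (st.1.insert c st.2, st.2 + cnt c)) (d, acc)).1).keys = d.keys ++ l := by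
  intro l
  induction l with
  | nil => intro _ d acc _; simp
  | cons c t ih =>
    intro hnd d acc hf
    simp only [List.foldl_cons]
    rw [ih (List.nodup_cons.mp hnd).2 (d.insert c acc) (acc + cnt c) ?_]
    · rw [PySem.Dict.keys_insert_of_not_contains d acc (hf c (List.mem_cons_self))]
      simp
    · intro c' hc'
      rw [PySem.Dict.contains_insert]
      have : c' ≠ c := fun h => (List.nodup_cons.mp hnd).1 (h ▸ hc')
      simp [this, hf c' (List.mem_cons_of_mem _ hc')]

-- B's loop: lookup in the final dict (the value of a distinct key k is f k).
theorem bFold_get? (f : Char → Int) :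
    ∀ (l : List Char), l.Nodup → ∀ (d : PySem.Dict Char Int) (k : Char),
    (l.foldl (fun (d : PySem.Dict Char Int) c => d.insert c (f c)) d).get? k
      = if k ∈ l then some (f k) else d.get? k := by
  intro l
  induction l with
  | nil => intro _ d k; simp
  | cons c t ih =>
    intro hnd d k
    rw [List.foldl_cons, ih (List.nodup_cons.mp hnd).2 (d.insert c (f c)) k]
    by_cases hk : k = c
    · subst hk
      have hkt : k ∉ t := (List.nodup_cons.mp hnd).1
      simp [hkt, PySem.Dict.get?_insert_self]
    · by_cases hkt : k ∈ t
      · simp [hkt]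
      · have : k ∉ (c :: t) := by simp [hk, hkt]
        simp [hkt, this, PySem.Dict.get?_insert_of_ne _ _ hk]

-- B's loop: keys of the final dict (fresh distinct keys append in order).
theorem bFold_keys (f : Char → Int) :
    ∀ (l : List Char), l.Nodup → ∀ (d : PySem.Dict Char Int),
    (∀ c ∈ l, d.contains c = false) →
    (l.foldl (fun (d : PySem.Dict Char Int) c => d.insert c (f c)) d).keys = d.keys ++ l := by
  intro l
  induction l with
  | nil => intro _ d _; simp
  | cons c t ih =>
    intro hnd d hf
    rw [List.foldl_cons, ih (List.nodup_cons.mp hnd).2 (d.insert c (f c)) ?_]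
    · rw [PySem.Dict.keys_insert_of_not_contains d (f c) (hf c (List.mem_cons_self))]
      simp
    · intro c' hc'
      rw [PySem.Dict.contains_insert]
      have : c' ≠ c := fun h => (List.nodup_cons.mp hnd).1 (h ▸ hc')
      simp [this, hf c' (List.mem_cons_of_mem _ hc')]

-- In a ≤-sorted list, the prefix before the first occurrence of k consists exactly of the elements < k.
theorem takeWhile_ne_eq_filter_lt :
    ∀ (l : List Char) (k : Char), l.Pairwise (· ≤ ·) → k ∈ l →
    l.takeWhile (fun c => !(c == k)) = l.filter (fun c => decide (c < k)) := by
  intro l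
  induction l with
  | nil => intro k _ h; simp at h
  | cons c t ih =>
    intro k hp hm
    have hle : ∀ x ∈ t, c ≤ x := (List.pairwise_cons.mp hp).1
    by_cases hck : c = k
    · subst hck
      have h1 : t.filter (fun x => decide (x < c)) = [] := by
        rw [List.filter_eq_nil_iff]
        intro x hx
        simp [not_lt.mpr (hle x hx)]
      simp [h1]
    · have hkt : k ∈ t := by cases hm with
        | head => exact absurd rfl hck
        | tail _ h => exact h
      have hclt : c < k := lt_of_le_of_ne (hle k hkt) hck
      simp [hck, hclt, ih k (List.pairwise_cons.mp hp).2 hkt]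

-- Summing the multiplicities of the distinct elements satisfying q counts the elements satisfying q.
theorem sum_counts_filter (q : Char → Bool) :
    ∀ (cs u : List Char), u.Nodup → (∀ x ∈ cs, x ∈ u) →
    ((u.filter q).map (fun y => (List.count y cs : Int))).sum = (cs.countP q : Int) := by
  intro cs
  induction cs with
  | nil => intro u _ _; simp
  | cons x cs ih =>
    intro u hnd hmem
    have ihe := ih u hnd (fun a ha => hmem a (List.mem_cons_of_mem _ ha))
    have h1 : ∀ y : Char, (List.count y (x :: cs) : Int)
        = (List.count y cs : Int) + (if (x == y) = true then (1:Int) else 0) := by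
      intro y; rw [List.count_cons]; split <;> push_cast <;> ring
    have h2 : ((u.filter q).map (fun y => (List.count y (x :: cs) : Int))).sum
        = ((u.filter q).map (fun y => (List.count y cs : Int))).sum
          + ((u.filter q).map (fun y => if (x == y) = true then (1:Int) else 0)).sum := by
      rw [← PySem.List.sum_map_add_int]
      exact congrArg _ (List.map_congr_left (fun y _ => h1 y))
    have h3 : ((u.filter q).map (fun y => if (x == y) = true then (1:Int) else 0)).sum
        = ((u.filter q).count x : Int) := by
      rw [PySem.List.sum_map_ite_one_zero (fun y => x == y) (u.filter q)]
      congr 1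
      rw [List.count]
      exact List.countP_congr (fun y _ => by simp [BEq.comm])
    have h4 : ((u.filter q).count x : Int) = if q x = true then 1 else 0 := by
      have hx : x ∈ u := hmem x List.mem_cons_self
      by_cases hq : q x = true
      · have : x ∈ u.filter q := List.mem_filter.mpr ⟨hx, hq⟩
        rw [List.count_eq_one_of_mem (hnd.filter q) this]
        simp [hq]
      · have : x ∉ u.filter q := fun h => hq (List.mem_filter.mp h).2
        rw [List.count_eq_zero_of_not_mem this]
        simp [hq]
    rw [h2, h3, h4, ihe, List.countP_cons]
    split <;> push_cast <;> ring

theorem ports_eq (text : String) : count_lookup text = count_lookup_alt text := by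
  simp only [count_lookup, count_lookup_alt]
  set cs := text.toList with hcs
  set u := PySem.List.sorted (PySem.Set.ofList cs) (fun c => c) false with hu
  set f : Char → Int := fun c => ((cs.filter (fun x => decide (x < c))).map (fun _ => (1:Int))).sum with hf
  have hund : u.Nodup :=
    ((PySem.List.sorted_perm (PySem.Set.ofList cs) (fun c => c) false).nodup_iff).mpr
      (PySem.Set.nodup_ofList cs)
  have hule : u.Pairwise (· ≤ ·) := PySem.List.sorted_pairwise (PySem.Set.ofList cs) (fun c => c)
  have hmemu : ∀ x, x ∈ u ↔ x ∈ cs := fun x => by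
    rw [hu, PySem.List.mem_sorted, PySem.Set.mem_ofList]
  have hkeysA := aFold_keys (fun c => (PySem.Dict.counter cs).getD c 0) u hund
    PySem.Dict.empty 0 (by intro c _; simp)
  have hkeysB := bFold_keys f u hund PySem.Dict.empty (by intro c _; simp)
  have hkeysA' : ((u.foldl
      (fun (st : PySem.Dict Char Int × Int) c =>
        (st.1.insert c st.2, st.2 + (PySem.Dict.counter cs).getD c 0))
      (PySem.Dict.empty, 0)).1).keys = u := by
    rw [hkeysA]; simp
  have hkeysB' : (u.foldl (fun (d : PySem.Dict Char Int) c => d.insert c (f c))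
      PySem.Dict.empty).keys = u := by
    rw [hkeysB]; simp
  rw [PySem.Dict.items_eq_map_keys _ (by rw [hkeysA']; exact hund) 0,
      PySem.Dict.items_eq_map_keys _ (by rw [hkeysB']; exact hund) 0,
      hkeysA', hkeysB']
  apply congrArg
  apply List.map_congr_left
  intro k hk
  have hkcs : k ∈ cs := (hmemu k).mp hk
  have hA := aFold_get? (fun c => (PySem.Dict.counter cs).getD c 0) u hund PySem.Dict.empty 0 k
  have hB := bFold_get? f u hund PySem.Dict.empty k
  rw [if_pos hk] at hA
  rw [if_pos hk] at hB
  rw [PySem.Dict.getD_eq_get?_getD, PySem.Dict.getD_eq_get?_getD, hA, hB,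
      Option.getD_some, Option.getD_some]
  apply congrArg
  rw [zero_add, takeWhile_ne_eq_filter_lt u k hule hk]
  have hcnt : (u.filter (fun c => decide (c < k))).map (fun c => (PySem.Dict.counter cs).getD c 0)
      = (u.filter (fun c => decide (c < k))).map (fun y => (List.count y cs : Int)) :=
    List.map_congr_left (fun y _ => PySem.Dict.getD_counter cs y)
  rw [hcnt, sum_counts_filter (fun c => decide (c < k)) cs u hund (fun x hx => (hmemu x).mpr hx), hf]
  simp
  rw [List.countP_eq_length_filter]

-- ===== VERDICT (by name: the statement is the Claim_ definition above) =====
theorem count_lookup_spec : Claim_equal_count_lookup := by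
  intro text _
  unfold Spec_count_lookup
  exact ports_eq text
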